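-- pv_equiv track=rewrite | github.com/DarkArmed/Coursera | Principles of Computing/mini-project 7.py | gen_all_strings
-- ===== SOURCE A (Python) =====
-- def gen_all_strings(word):
--     """
--     Generate all strings that can be composed from the letters in word
--     in any order.
--
--     Returns a list of all strings that can be formed from the letters
--     in word.
--
--     This function should be recursive.
--     """
--     if len(word) == 0:
--         return ['']
--     ans = []
--     for elem in gen_all_strings(word[1:]):
--         ans.append(elem)
--         for idx in range(len(elem) + 1):
--             ans.append(elem[:idx] + word[0] + elem[idx:])
--     return ans
-- ===== SOURCE B (Python) =====
-- def gen_all_strings(word):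
--     result = ['']
--     for letter in reversed(word):
--         result = [t for s in result
--                   for t in [s] + [s[:i] + letter + s[i:] for i in range(len(s) + 1)]]
--     return result
-- ===== Notes on version B (the rewrite author's own statement) =====
-- stated objective: alternative
-- what changed: Replaced the recursion on word[1:] with an iterative loop over reversed(word) that rebuilds the result list by a flat comprehension (each string followed by all its letter-insertions) instead of nested append loops.
import Mathlib
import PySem

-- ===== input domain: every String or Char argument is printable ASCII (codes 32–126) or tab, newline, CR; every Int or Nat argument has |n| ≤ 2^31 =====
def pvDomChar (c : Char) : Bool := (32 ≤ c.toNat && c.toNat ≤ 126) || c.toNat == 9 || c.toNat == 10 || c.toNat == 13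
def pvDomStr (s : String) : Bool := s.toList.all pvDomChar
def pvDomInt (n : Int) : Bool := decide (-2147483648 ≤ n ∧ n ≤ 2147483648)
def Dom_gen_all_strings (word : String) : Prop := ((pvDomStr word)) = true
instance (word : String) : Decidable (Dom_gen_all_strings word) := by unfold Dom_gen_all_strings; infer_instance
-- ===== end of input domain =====

-- B replaces A's recursion on the tail with an iterative fold over the reversed word,
-- rebuilding the list by a flat comprehension; same cost, different decomposition.

-- ===== PORT A =====
-- recursion on the code-point list; word[1:] / word[0] become the tail / head of the list
def genA_core : List Char → List (List Char)
  | [] => [[]]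
  | c :: rest =>
      (genA_core rest).foldl
        (fun ans elem =>
          (PySem.List.pyRange 0 (elem.length + 1) 1).foldl
            (fun ans2 idx =>
              ans2 ++ [PySem.List.slice elem none (some idx) ++ [c]
                        ++ PySem.List.slice elem (some idx) none])
            (ans ++ [elem]))
        []

def gen_all_strings (word : String) : List String :=
  (genA_core word.toList).map (fun l => String.ofList l)

-- ===== PORT B =====
-- [s[:i] + letter + s[i:] for i in range(len(s) + 1)]
def pvInsertions (c : Char) (s : List Char) : List (List Char) :=
  (PySem.List.pyRange 0 (s.length + 1) 1).map
    (fun i => PySem.List.slice s none (some i) ++ [c] ++ PySem.List.slice s (some i) none)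

def genB_core (word : List Char) : List (List Char) :=
  word.reverse.foldl (fun acc c => acc.flatMap (fun s => s :: pvInsertions c s)) [[]]

def gen_all_strings_alt (word : String) : List String :=
  (genB_core word.toList).map (fun l => String.ofList l)

-- ===== PRECONDITION & SPEC =====
def Spec_gen_all_strings (word : String) (out : List String) : Prop := out = gen_all_strings_alt word
instance (word : String) (out : List String) : Decidable (Spec_gen_all_strings word out) := by unfold Spec_gen_all_strings; infer_instance

-- ===== CLAIM (what is proved, stated in full; the proofs are below) =====
def Claim_equal_gen_all_strings : Prop := ∀ (word : String), Dom_gen_all_strings word → Spec_gen_all_strings word (gen_all_strings word)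

-- ===== LEMMAS AND PROOFS =====

lemma flatMap_single {α β : Type} (f : α → β) (l : List α) :
    l.flatMap (fun x => [f x]) = l.map f := by
  induction l with
  | nil => rfl
  | cons x xs ih => simp [List.flatMap_cons, ih]

-- the inner append loop over range(len(elem)+1) is exactly elem's insertion list
lemma innerA_eq (c : Char) (elem : List Char) (ans0 : List (List Char)) :
    (PySem.List.pyRange 0 (elem.length + 1) 1).foldl
      (fun ans2 idx =>
        ans2 ++ [PySem.List.slice elem none (some idx) ++ [c]
                  ++ PySem.List.slice elem (some idx) none])
      ans0 = ans0 ++ pvInsertions c elem := by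
  rw [PySem.List.foldl_append_eq_flatMap
      (g := fun idx => [PySem.List.slice elem none (some idx) ++ [c]
                        ++ PySem.List.slice elem (some idx) none])]
  rw [flatMap_single]
  rfl

-- A's step on one letter is B's step on that letter
lemma stepA_eq (c : Char) (l : List (List Char)) :
    l.foldl
      (fun ans elem =>
        (PySem.List.pyRange 0 (elem.length + 1) 1).foldl
          (fun ans2 idx =>
            ans2 ++ [PySem.List.slice elem none (some idx) ++ [c]
                      ++ PySem.List.slice elem (some idx) none])
          (ans ++ [elem]))
      [] = l.flatMap (fun s => s :: pvInsertions c s) := by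
  have h : ∀ (init : List (List Char)),
      l.foldl
        (fun ans elem =>
          (PySem.List.pyRange 0 (elem.length + 1) 1).foldl
            (fun ans2 idx =>
              ans2 ++ [PySem.List.slice elem none (some idx) ++ [c]
                        ++ PySem.List.slice elem (some idx) none])
            (ans ++ [elem]))
        init = init ++ l.flatMap (fun s => s :: pvInsertions c s) := by
    induction l with
    | nil => simp
    | cons x xs ih =>
        intro init
        simp only [List.foldl_cons, List.flatMap_cons]
        rw [innerA_eq, ih]
        simp
  simpa using h []

lemma core_eq (l : List Char) : genA_core l = genB_core l := by
  induction l with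
  | nil => simp [genA_core, genB_core]
  | cons c rest ih =>
      rw [genA_core, stepA_eq, ih]
      simp [genB_core, List.foldl_append]

-- ===== VERDICT (by name: the statement is the Claim_ definition above) =====
theorem gen_all_strings_spec : Claim_equal_gen_all_strings := by
  intro word _
  unfold Spec_gen_all_strings gen_all_strings gen_all_strings_alt
  rw [core_eq]
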